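-- pv_equiv track=rewrite | github.com/yapit-tts/yapit | scripts/seed_perf_fixtures.py | generate_dense_sections
-- ===== SOURCE A (Python) =====
-- SENTENCES = [
--     "The quick brown fox jumps over the lazy dog near the riverbank.",
--     "Advances in machine learning have transformed how we approach complex optimization problems across many domains.",
--     "She opened the door to find an empty room, save for a single chair facing the window.",
--     "The committee reviewed the proposal and determined that further analysis would be required before proceeding.",
--     "Rain fell steadily through the afternoon, pooling in the gutters and running in thin streams down the hill.",
--     "According to recent studies, the correlation between sleep quality and cognitive performance is stronger than previously thought.",
--     "He picked up the phone, hesitated, then set it back down on the counter without dialing.",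
--     "The architecture of distributed systems requires careful consideration of failure modes, network partitions, and data consistency.",
--     "Sunlight filtered through the canopy, casting dappled shadows across the forest floor where mushrooms grew in clusters.",
--     "The fundamental theorem establishes that every continuous function on a closed interval attains its maximum and minimum values.",
-- ]
--
-- def _paragraph(block_idx: int, max_chars: int = 0) -> str:
--     """Generate a paragraph, optionally truncated to fit within content limits."""
--     s1 = SENTENCES[block_idx % len(SENTENCES)]
--     s2 = SENTENCES[(block_idx * 3 + 1) % len(SENTENCES)]
--     full = f"{s1} {s2}"
--     if max_chars > 0 and len(full) > max_chars:
--         return full[:max_chars]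
--     return full
--
-- MAX_CONTENT_CHARS = 490_000  # API limit is 500k, leave headroom
--
-- SEPARATOR_CHARS = 2  # "\n\n" between paragraphs
--
-- def _chars_per_paragraph(n_blocks: int, heading_overhead: int = 0) -> int:
--     """Max chars per paragraph to stay under API limit. 0 = no limit."""
--     available = MAX_CONTENT_CHARS - heading_overhead - n_blocks * SEPARATOR_CHARS
--     budget = available // max(n_blocks, 1)
--     # No need to truncate if budget exceeds typical paragraph length
--     return 0 if budget >= 220 else max(20, budget)
--
-- def generate_dense_sections(n_blocks: int) -> str:
--     """H2 heading every ~5 blocks. Worst case for section scanning."""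
--     section_interval = 5
--     n_headings = n_blocks // section_interval + 1
--     max_chars = _chars_per_paragraph(n_blocks, heading_overhead=n_headings * 25)
--     parts: list[str] = ["# Document with Dense Sections"]
--     section_num = 0
--     for i in range(n_blocks):
--         if i % section_interval == 0:
--             section_num += 1
--             parts.append(f"## Subsection {section_num}")
--         parts.append(_paragraph(i, max_chars))
--     return "\n\n".join(parts)
-- ===== SOURCE B (Python) =====
-- SENTENCES = [
--     "The quick brown fox jumps over the lazy dog near the riverbank.",
--     "Advances in machine learning have transformed how we approach complex optimization problems across many domains.",
--     "She opened the door to find an empty room, save for a single chair facing the window.",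
--     "The committee reviewed the proposal and determined that further analysis would be required before proceeding.",
--     "Rain fell steadily through the afternoon, pooling in the gutters and running in thin streams down the hill.",
--     "According to recent studies, the correlation between sleep quality and cognitive performance is stronger than previously thought.",
--     "He picked up the phone, hesitated, then set it back down on the counter without dialing.",
--     "The architecture of distributed systems requires careful consideration of failure modes, network partitions, and data consistency.",
--     "Sunlight filtered through the canopy, casting dappled shadows across the forest floor where mushrooms grew in clusters.",
--     "The fundamental theorem establishes that every continuous function on a closed interval attains its maximum and minimum values.",
-- ]
--
-- MAX_CONTENT_CHARS = 490_000
-- SEPARATOR_CHARS = 2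
--
--
-- def _paragraph(block_idx: int, max_chars: int = 0) -> str:
--     s1 = SENTENCES[block_idx % len(SENTENCES)]
--     s2 = SENTENCES[(block_idx * 3 + 1) % len(SENTENCES)]
--     full = f"{s1} {s2}"
--     if max_chars > 0 and len(full) > max_chars:
--         return full[:max_chars]
--     return full
--
--
-- def _chars_per_paragraph(n_blocks: int, heading_overhead: int = 0) -> int:
--     available = MAX_CONTENT_CHARS - heading_overhead - n_blocks * SEPARATOR_CHARS
--     budget = available // max(n_blocks, 1)
--     return 0 if budget >= 220 else max(20, budget)
--
--
-- def generate_dense_sections(n_blocks: int) -> str: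
--     """Staged pipeline: materialize all paragraphs, slice them into 5-block
--     sections, render each section as its own joined string, then join the
--     sections under the title (join of joins, no per-block loop or counter)."""
--     n_headings = n_blocks // 5 + 1
--     max_chars = _chars_per_paragraph(n_blocks, heading_overhead=n_headings * 25)
--     paragraphs = [_paragraph(i, max_chars) for i in range(n_blocks)]
--     sections = [
--         "\n\n".join([f"## Subsection {j + 1}", *paragraphs[j * 5:(j + 1) * 5]])
--         for j in range((n_blocks + 4) // 5)
--     ]
--     return "\n\n".join(["# Document with Dense Sections", *sections])
-- ===== Notes on version B (the rewrite author's own statement) =====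
-- stated objective: alternative
-- what changed: Replaces A's single stateful per-block loop (modulo guard, mutable section counter, one flat parts list) by a staged data pipeline: first materialize the full paragraph list, then slice it into five-paragraph sections rendered as independently joined strings (section count computed in closed form), and finally join the section strings under the title - a join-of-joins with no per-block control flow.
import Mathlib
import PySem

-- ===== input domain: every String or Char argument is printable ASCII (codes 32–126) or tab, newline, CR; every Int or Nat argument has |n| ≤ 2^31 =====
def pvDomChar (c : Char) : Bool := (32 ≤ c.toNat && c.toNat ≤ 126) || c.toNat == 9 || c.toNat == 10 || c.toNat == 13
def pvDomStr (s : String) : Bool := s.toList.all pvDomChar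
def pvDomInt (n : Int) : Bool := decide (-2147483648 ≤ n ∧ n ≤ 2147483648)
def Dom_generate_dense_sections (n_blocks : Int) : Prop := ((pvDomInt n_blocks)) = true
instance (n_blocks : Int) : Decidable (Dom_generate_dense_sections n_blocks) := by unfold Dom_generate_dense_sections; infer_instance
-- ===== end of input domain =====

-- B replaces A's stateful per-block loop (modulo guard + mutable section counter) by a staged
-- pipeline: materialize the paragraph list, slice it into 5-paragraph sections, join each section,
-- join the sections under the title; same O(n) cost (objective: alternative).

-- ===== PORT A =====
def pvSentences : List String :=
  [ "The quick brown fox jumps over the lazy dog near the riverbank.",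
    "Advances in machine learning have transformed how we approach complex optimization problems across many domains.",
    "She opened the door to find an empty room, save for a single chair facing the window.",
    "The committee reviewed the proposal and determined that further analysis would be required before proceeding.",
    "Rain fell steadily through the afternoon, pooling in the gutters and running in thin streams down the hill.",
    "According to recent studies, the correlation between sleep quality and cognitive performance is stronger than previously thought.",
    "He picked up the phone, hesitated, then set it back down on the counter without dialing.",
    "The architecture of distributed systems requires careful consideration of failure modes, network partitions, and data consistency.",
    "Sunlight filtered through the canopy, casting dappled shadows across the forest floor where mushrooms grew in clusters.",
    "The fundamental theorem establishes that every continuous function on a closed interval attains its maximum and minimum values." ]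

-- _paragraph: the index is i % 10 ∈ [0,10), always in range, so the .getD "" default is never hit
def pvParagraph (block_idx : Int) (max_chars : Int) : String :=
  let s1 := (PySem.List.pyGet? pvSentences (PySem.Int.mod block_idx 10)).getD ""
  let s2 := (PySem.List.pyGet? pvSentences (PySem.Int.mod (block_idx * 3 + 1) 10)).getD ""
  let full := s1 ++ " " ++ s2
  if 0 < max_chars ∧ max_chars < PySem.Str.len full then PySem.Str.slice full none (some max_chars)
  else full

def pvCharsPerParagraph (n_blocks : Int) (heading_overhead : Int) : Int :=
  let available := 490000 - heading_overhead - n_blocks * 2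
  let budget := PySem.Int.floordiv available (max n_blocks 1)
  if 220 ≤ budget then 0 else max 20 budget

-- body of A's loop (state: parts so far, section_num)
def pvStepA (f : Int → String) (st : List String × Int) (i : Int) : List String × Int :=
  let st' := if PySem.Int.mod i 5 == 0
             then (st.1 ++ ["## Subsection " ++ PySem.Int.toStr (st.2 + 1)], st.2 + 1)
             else st
  (st'.1 ++ [f i], st'.2)

def generate_dense_sections (n_blocks : Int) : String :=
  let n_headings := PySem.Int.floordiv n_blocks 5 + 1
  let max_chars := pvCharsPerParagraph n_blocks (n_headings * 25)
  PySem.Str.join "\n\n"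
    ((PySem.List.pyRange 0 n_blocks 1).foldl (pvStepA (fun i => pvParagraph i max_chars))
      (["# Document with Dense Sections"], 0)).1

-- ===== PORT B =====
def generate_dense_sections_alt (n_blocks : Int) : String :=
  let n_headings := PySem.Int.floordiv n_blocks 5 + 1
  let max_chars := pvCharsPerParagraph n_blocks (n_headings * 25)
  let paragraphs := (PySem.List.pyRange 0 n_blocks 1).map (fun i => pvParagraph i max_chars)
  let sections := (PySem.List.pyRange 0 (PySem.Int.floordiv (n_blocks + 4) 5) 1).map
    (fun j => PySem.Str.join "\n\n"
      (("## Subsection " ++ PySem.Int.toStr (j + 1)) ::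
        PySem.List.slice paragraphs (some (j * 5)) (some ((j + 1) * 5))))
  PySem.Str.join "\n\n" ("# Document with Dense Sections" :: sections)

-- ===== PRECONDITION & SPEC =====
def Spec_generate_dense_sections (n_blocks : Int) (out : String) : Prop := out = generate_dense_sections_alt n_blocks
instance (n_blocks : Int) (out : String) : Decidable (Spec_generate_dense_sections n_blocks out) := by unfold Spec_generate_dense_sections; infer_instance

-- ===== CLAIM (what is proved, stated in full; the proofs are below) =====
def Claim_equal_generate_dense_sections : Prop := ∀ (n_blocks : Int), Dom_generate_dense_sections n_blocks → Spec_generate_dense_sections n_blocks (generate_dense_sections n_blocks)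

-- ===== LEMMAS AND PROOFS =====

-- B's section body for index j, as a list of strings (heading :: its ≤5 paragraphs)
def pvSecList (f : Int → String) (n j : Int) : List String :=
  ("## Subsection " ++ PySem.Int.toStr (j + 1)) ::
    (PySem.List.pyRange (j * 5) (min (j * 5 + 5) n) 1).map f

lemma pvFloordiv_five (k : Int) : PySem.Int.floordiv (5 * k) 5 = k := by
  rw [PySem.Int.floordiv_eq_iff_of_pos (by norm_num)]
  omega


lemma pvFloordiv_bounds (a : Int) :
    5 * PySem.Int.floordiv a 5 ≤ a ∧ a < 5 * PySem.Int.floordiv a 5 + 5 := by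
  have h := (PySem.Int.floordiv_eq_iff_of_pos
    (a := a) (b := 5) (q := PySem.Int.floordiv a 5) (by norm_num)).mp rfl
  omega

lemma pvNoHead (f : Int → String) :
    ∀ (l : List Int) (p : List String) (σ : Int), (∀ i ∈ l, ¬ (5:Int) ∣ i) →
      l.foldl (pvStepA f) (p, σ) = (p ++ l.map f, σ) := by
  intro l
  induction l with
  | nil => intro p σ _; simp
  | cons i l ih =>
    intro p σ h
    have hi : ¬ (5:Int) ∣ i := h i (List.mem_cons_self)
    rw [List.foldl_cons]
    have hstep : pvStepA f (p, σ) i = (p ++ [f i], σ) := by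
      simp [pvStepA, hi]
    rw [hstep, ih _ _ (fun j hj => h j (List.mem_cons_of_mem _ hj))]
    simp

-- A's flat stateful pass over [s, n) (section counter = s/5), characterized as a flatMap
-- over the section indices: this is the heart of the equivalence.
lemma pvKey (f : Int → String) (n : Int) :
    ∀ (m : Nat) (s : Int) (parts : List String), 5 ∣ s → (n - s).toNat ≤ m →
      ((PySem.List.pyRange s n 1).foldl (pvStepA f) (parts, PySem.Int.floordiv s 5)).1
        = parts ++ (PySem.List.pyRange (PySem.Int.floordiv s 5)
            (PySem.Int.floordiv (n + 4) 5) 1).flatMap (pvSecList f n) := by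
  intro m
  induction m with
  | zero =>
    intro s parts _ hle
    have hq : PySem.Int.floordiv (n + 4) 5 ≤ PySem.Int.floordiv s 5 := by
      have h1 := pvFloordiv_bounds (n + 4)
      have h2 := pvFloordiv_bounds s
      omega
    rw [PySem.List.pyRange_one_eq_nil (by omega), PySem.List.pyRange_one_eq_nil hq]
    simp
  | succ m ih =>
    intro s parts hdvd hle
    by_cases hlt : s < n
    · obtain ⟨k, hk⟩ := hdvd
      have hsle : s ≤ min (s + 5) n := by omega
      have hmle : min (s + 5) n ≤ n := by omega
      rw [PySem.List.pyRange_one_append s (min (s + 5) n) n hsle hmle, List.foldl_append]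
      have hchunk : PySem.List.pyRange s (min (s + 5) n) 1
          = s :: PySem.List.pyRange (s + 1) (min (s + 5) n) 1 :=
        PySem.List.pyRange_one_cons (by omega)
      have hmod : (5:Int) ∣ s := ⟨k, hk⟩
      have hnomod : ∀ i ∈ PySem.List.pyRange (s + 1) (min (s + 5) n) 1, ¬ (5:Int) ∣ i := by
        intro i hi
        rw [PySem.List.mem_pyRange_one] at hi
        rintro ⟨j, hj⟩
        omega
      rw [hchunk, List.foldl_cons]
      have hstep : pvStepA f (parts, PySem.Int.floordiv s 5) s
          = (parts ++ ["## Subsection " ++ PySem.Int.toStr (PySem.Int.floordiv s 5 + 1)]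
               ++ [f s], PySem.Int.floordiv s 5 + 1) := by
        simp [pvStepA, hmod]
      rw [hstep, pvNoHead f _ _ _ hnomod]
      have hrem : PySem.List.pyRange (min (s + 5) n) n 1 = PySem.List.pyRange (s + 5) n 1 := by
        by_cases h : n ≤ s + 5
        · rw [min_eq_right h, PySem.List.pyRange_one_eq_nil le_rfl,
              PySem.List.pyRange_one_eq_nil h]
        · rw [min_eq_left (by omega)]
      have h1 : PySem.Int.floordiv s 5 = k := by rw [hk]; exact pvFloordiv_five k
      have hsec : PySem.Int.floordiv s 5 + 1 = PySem.Int.floordiv (s + 5) 5 := by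
        have h2 : PySem.Int.floordiv (s + 5) 5 = k + 1 := by
          rw [hk, show 5 * k + 5 = 5 * (k + 1) by ring]; exact pvFloordiv_five (k + 1)
        omega
      rw [hrem]
      have happly := ih (s + 5)
        (parts ++ ["## Subsection " ++ PySem.Int.toStr (PySem.Int.floordiv s 5 + 1)]
          ++ [f s] ++ (PySem.List.pyRange (s + 1) (min (s + 5) n) 1).map f)
        ⟨k + 1, by omega⟩ (by omega)
      rw [← hsec] at happly
      rw [show (parts ++ ["## Subsection " ++ PySem.Int.toStr (PySem.Int.floordiv s 5 + 1)]
            ++ [f s]) ++ (PySem.List.pyRange (s + 1) (min (s + 5) n) 1).map f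
          = parts ++ ["## Subsection " ++ PySem.Int.toStr (PySem.Int.floordiv s 5 + 1)]
            ++ [f s] ++ (PySem.List.pyRange (s + 1) (min (s + 5) n) 1).map f by simp]
      rw [happly]
      -- now fold the first section into the flatMap on the right
      have hcons : PySem.List.pyRange (PySem.Int.floordiv s 5)
            (PySem.Int.floordiv (n + 4) 5) 1
          = PySem.Int.floordiv s 5 ::
              PySem.List.pyRange (PySem.Int.floordiv s 5 + 1)
                (PySem.Int.floordiv (n + 4) 5) 1 := by
        apply PySem.List.pyRange_one_cons
        have h1 := pvFloordiv_bounds (n + 4)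
        omega
      rw [hcons, List.flatMap_cons]
      have hsect : pvSecList f n (PySem.Int.floordiv s 5)
          = ("## Subsection " ++ PySem.Int.toStr (PySem.Int.floordiv s 5 + 1)) ::
              (f s :: (PySem.List.pyRange (s + 1) (min (s + 5) n) 1).map f) := by
        unfold pvSecList
        rw [h1, show k * 5 = s by omega, hchunk]
        simp
      rw [hsect]
      simp
    · have hq : PySem.Int.floordiv (n + 4) 5 ≤ PySem.Int.floordiv s 5 := by
        have h1 := pvFloordiv_bounds (n + 4)
        have h2 := pvFloordiv_bounds s
        omega
      rw [PySem.List.pyRange_one_eq_nil (by omega), PySem.List.pyRange_one_eq_nil hq]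
      simp

-- Chars.join distributes over append of nonempty part lists
lemma pvCharsJoin_append (sep : List Char) :
    ∀ (u v : List (List Char)), u ≠ [] → v ≠ [] →
      PySem.Chars.join sep (u ++ v)
        = PySem.Chars.join sep u ++ sep ++ PySem.Chars.join sep v := by
  intro u
  induction u with
  | nil => intro v h _; exact absurd rfl h
  | cons a u ih =>
    intro v _ hv
    cases u with
    | nil =>
      cases v with
      | nil => exact absurd rfl hv
      | cons b v' =>
        rw [List.singleton_append, PySem.Chars.join_cons_cons, PySem.Chars.join_singleton]
    | cons a' u' =>
      have h2 : (a :: a' :: u') ++ v = a :: ((a' :: u') ++ v) := by simp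
      rw [h2, List.cons_append, PySem.Chars.join_cons_cons, ← List.cons_append,
          ih v (by simp) hv, PySem.Chars.join_cons_cons]
      simp [List.append_assoc]

lemma pvCharsJoin_cons (sep x : List Char) (r : List (List Char)) (hr : r ≠ []) :
    PySem.Chars.join sep (x :: r) = x ++ sep ++ PySem.Chars.join sep r := by
  cases r with
  | nil => exact absurd rfl hr
  | cons b r' => exact PySem.Chars.join_cons_cons sep x b r'

-- a pre-joined section melts back into the flat part list
lemma pvCharsJoin_glue (sep : List Char) (l r : List (List Char)) (hl : l ≠ []) :
    PySem.Chars.join sep (PySem.Chars.join sep l :: r) = PySem.Chars.join sep (l ++ r) := by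
  cases r with
  | nil => rw [PySem.Chars.join_singleton, List.append_nil]
  | cons b r' =>
    rw [pvCharsJoin_cons sep _ _ (by simp),
        pvCharsJoin_append sep l (b :: r') hl (by simp)]

-- join of per-section joins = join of the flattened section lists (Chars level)
lemma pvCharsJoin_of_joins (sep : List Char) :
    ∀ (L : List (List (List Char))), (∀ l ∈ L, l ≠ []) → ∀ (x : List Char),
      PySem.Chars.join sep (x :: L.map (PySem.Chars.join sep))
        = PySem.Chars.join sep (x :: L.flatten) := by
  intro L
  induction L with
  | nil => intro _ x; rfl
  | cons l L ih =>
    intro h x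
    have hl : l ≠ [] := h l (List.mem_cons_self)
    have hL : ∀ l' ∈ L, l' ≠ [] := fun l' hl' => h l' (List.mem_cons_of_mem _ hl')
    have hflat : l ++ L.flatten ≠ [] := by
      cases l with
      | nil => exact absurd rfl hl
      | cons a t => simp
    rw [List.map_cons, pvCharsJoin_cons sep x _ (by simp), ih hL (PySem.Chars.join sep l),
        pvCharsJoin_glue sep l L.flatten hl, List.flatten_cons,
        pvCharsJoin_cons sep x _ hflat]

-- the same at the String level
lemma pvJoin_of_joins (sep : String) (L : List (List String)) (x : String)
    (h : ∀ l ∈ L, l ≠ []) :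
    PySem.Str.join sep (x :: L.map (PySem.Str.join sep))
      = PySem.Str.join sep (x :: L.flatten) := by
  apply String.toList_inj.mp
  simp only [PySem.Str.toList_join, List.map_cons, List.map_map]
  have hmap : List.map (String.toList ∘ PySem.Str.join sep) L
      = (L.map (List.map String.toList)).map (PySem.Chars.join sep.toList) := by
    rw [List.map_map]
    apply List.map_congr_left
    intro l _
    simp [Function.comp, PySem.Str.toList_join]
  have hflat : List.map String.toList L.flatten
      = (L.map (List.map String.toList)).flatten := List.map_flatten
  rw [hmap, hflat]
  apply pvCharsJoin_of_joins
  intro l hl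
  rw [List.mem_map] at hl
  obtain ⟨l', hl', rfl⟩ := hl
  simpa [List.map_eq_nil_iff] using h l' hl'

-- B's slice of the materialized paragraph list is A's per-section paragraph range
lemma pvChunk (f : Int → String) (n j : Int) (h0 : 0 ≤ j) (h1 : j * 5 < n) :
    PySem.List.slice ((PySem.List.pyRange 0 n 1).map f) (some (j * 5)) (some ((j + 1) * 5))
      = (PySem.List.pyRange (j * 5) (min (j * 5 + 5) n) 1).map f := by
  have ha : (0:Int) ≤ j * 5 := by positivity
  have hb : (0:Int) ≤ (j + 1) * 5 := by positivity
  rw [PySem.List.slice_toNat]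
  rw [← List.map_drop, ← List.map_take]
  congr 1
  have hsplit : PySem.List.pyRange 0 n 1
      = PySem.List.pyRange 0 (j * 5) 1 ++ PySem.List.pyRange (j * 5) n 1 :=
    PySem.List.pyRange_one_append 0 (j * 5) n ha (le_of_lt h1)
  have hlen : (PySem.List.pyRange 0 (j * 5) 1).length = (j * 5).toNat := by
    rw [PySem.List.length_pyRange_one]; omega
  rw [hsplit, ← hlen, List.drop_left, hlen]
  have htake : ((j + 1) * 5).toNat - (j * 5).toNat = 5 := by omega
  rw [htake]
  have hmin1 : j * 5 ≤ min (j * 5 + 5) n := by omega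
  have hmin2 : min (j * 5 + 5) n ≤ n := by omega
  rw [PySem.List.pyRange_one_append (j * 5) (min (j * 5 + 5) n) n hmin1 hmin2,
      List.take_append]
  have hlen2 : (PySem.List.pyRange (j * 5) (min (j * 5 + 5) n) 1).length
      = (min (j * 5 + 5) n - j * 5).toNat := by rw [PySem.List.length_pyRange_one]
  have hle5 : (PySem.List.pyRange (j * 5) (min (j * 5 + 5) n) 1).length ≤ 5 := by
    rw [hlen2]; omega
  rw [List.take_of_length_le hle5]
  by_cases hc : n ≤ j * 5 + 5
  · rw [min_eq_right hc, PySem.List.pyRange_one_eq_nil le_rfl]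
    simp
  · have : 5 - (PySem.List.pyRange (j * 5) (min (j * 5 + 5) n) 1).length = 0 := by
      rw [hlen2]; omega
    rw [this]
    simp
  exact ha
  exact hb

-- ===== VERDICT (by name: the statement is the Claim_ definition above) =====
theorem generate_dense_sections_spec : Claim_equal_generate_dense_sections := by
  intro n _
  unfold Spec_generate_dense_sections generate_dense_sections generate_dense_sections_alt
  dsimp only
  set f : Int → String := fun i => pvParagraph i
    (pvCharsPerParagraph n ((PySem.Int.floordiv n 5 + 1) * 25)) with hf
  have h0 : PySem.Int.floordiv (0 : Int) 5 = 0 := by decide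
  have key := pvKey f n (n - 0).toNat 0 ["# Document with Dense Sections"] ⟨0, by ring⟩ le_rfl
  rw [h0] at key
  rw [key]
  have hsections : (PySem.List.pyRange 0 (PySem.Int.floordiv (n + 4) 5) 1).map
        (fun j => PySem.Str.join "\n\n"
          (("## Subsection " ++ PySem.Int.toStr (j + 1)) ::
            PySem.List.slice ((PySem.List.pyRange 0 n 1).map f)
              (some (j * 5)) (some ((j + 1) * 5))))
      = (PySem.List.pyRange 0 (PySem.Int.floordiv (n + 4) 5) 1).map
          (fun j => PySem.Str.join "\n\n" (pvSecList f n j)) := by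
    apply List.map_congr_left
    intro j hj
    rw [PySem.List.mem_pyRange_one] at hj
    have hspec := pvFloordiv_bounds (n + 4)
    have hlt : j * 5 < n := by omega
    rw [pvChunk f n j hj.1 hlt]
    rfl
  rw [hsections]
  have hmapmap : (PySem.List.pyRange 0 (PySem.Int.floordiv (n + 4) 5) 1).map
        (fun j => PySem.Str.join "\n\n" (pvSecList f n j))
      = ((PySem.List.pyRange 0 (PySem.Int.floordiv (n + 4) 5) 1).map
          (pvSecList f n)).map (PySem.Str.join "\n\n") := by
    rw [List.map_map]; rfl
  rw [hmapmap, pvJoin_of_joins "\n\n" _ _ (by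
    intro l hl
    rw [List.mem_map] at hl
    obtain ⟨j, _, hje⟩ := hl
    rw [← hje]
    simp [pvSecList])]
  simp [List.flatMap_def]
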